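-- pv_equiv track=rewrite | github.com/thtang/ADLxMLDS2017 | hw1/model_rnn.py | cut_audio
-- ===== SOURCE A (Python) =====
-- def cut_audio(audio, lookback = 200, overlap = 10):
--     audio_len = len(audio)
--
--     if audio_len < lookback:
--         result = audio + ["None" for _ in range(lookback - audio_len)]
--         return [result]
--
--
--     else:
--         # pad the sequence first
--         start = 0
--         result = []
--         for i in range(audio_len//lookback+1):
--             seq = audio[start:start+lookback]
--             if len(seq) < lookback:
--                 result.append(seq + ["None" for _ in range(lookback - len(seq))])
--             else:
--                 result.append(seq)
--             start = start + lookback - overlap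
--
--         return(result)
-- ===== SOURCE B (Python) =====
-- def cut_audio(audio, lookback=200, overlap=10):
--     def go(rest, count):
--         if count <= 0:
--             return []
--         window = rest[:lookback]
--         window = window + ["None"] * (lookback - len(window))
--         return [window] + go(rest[lookback - overlap:], count - 1)
--     return go(audio, len(audio) // lookback + 1)
-- ===== Notes on version B (the rewrite author's own statement) =====
-- stated objective: alternative
-- what changed: B replaces A's indexed loop with a running start cursor and slices into the original list by a recursion that consumes the list itself: each step peels the head window off the remaining suffix and recurses on the suffix with the first stride elements dropped, counting windows down to zero.
-- outside the precondition, e.g. on cut_audio(['a'], 1, 2): A returns [['a'], ['None']], B returns [['a'], ['a']]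
import Mathlib
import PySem

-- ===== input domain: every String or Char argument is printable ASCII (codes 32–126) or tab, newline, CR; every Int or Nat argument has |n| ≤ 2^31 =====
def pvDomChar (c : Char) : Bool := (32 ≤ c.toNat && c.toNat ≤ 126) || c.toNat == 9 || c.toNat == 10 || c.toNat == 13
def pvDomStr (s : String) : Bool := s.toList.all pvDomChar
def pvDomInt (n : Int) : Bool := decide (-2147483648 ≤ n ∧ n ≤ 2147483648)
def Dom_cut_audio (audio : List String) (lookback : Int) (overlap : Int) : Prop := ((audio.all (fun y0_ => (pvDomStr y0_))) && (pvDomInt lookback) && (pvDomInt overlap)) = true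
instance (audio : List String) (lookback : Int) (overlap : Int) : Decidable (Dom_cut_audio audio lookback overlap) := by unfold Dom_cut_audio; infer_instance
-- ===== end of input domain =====

-- B swaps A's indexed loop (a running start cursor slicing into the original list) for a
-- recursion that consumes the list itself, peeling the head window off the remaining suffix
-- each step (objective: alternative, same cost).

-- ===== PORT A =====
-- one iteration of A's for-loop: state = (start, result)
def cutAudioStep (audio : List String) (lookback : Int) (overlap : Int)
    (st : Int × List (List String)) (_i : Int) : Int × List (List String) :=
  let start := st.1
  let seq := PySem.List.slice audio (some start) (some (start + lookback))
  let result :=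
    if (seq.length : Int) < lookback then
      st.2 ++ [seq ++ (PySem.List.pyRange 0 (lookback - (seq.length : Int)) 1).map (fun _ => "None")]
    else
      st.2 ++ [seq]
  (start + lookback - overlap, result)

def cut_audio (audio : List String) (lookback : Int) (overlap : Int) : List (List String) :=
  let audio_len : Int := audio.length
  if audio_len < lookback then
    [audio ++ (PySem.List.pyRange 0 (lookback - audio_len) 1).map (fun _ => "None")]
  else
    ((PySem.List.pyRange 0 (PySem.Int.floordiv audio_len lookback + 1) 1).foldl
      (cutAudioStep audio lookback overlap) (0, [])).2

-- ===== PORT B =====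
-- Source B's inner recursion 'go': peel rest[:lookback] (padded), recurse on rest[lookback-overlap:]
def cutAltGo (lookback : Int) (overlap : Int) (rest : List String) (count : Int) : List (List String) :=
  if h : count ≤ 0 then []
  else
    let window := PySem.List.slice rest none (some lookback)
    let window := window ++ List.replicate (lookback - (window.length : Int)).toNat "None"
    window :: cutAltGo lookback overlap (PySem.List.slice rest (some (lookback - overlap)) none) (count - 1)
termination_by count.toNat
decreasing_by omega

def cut_audio_alt (audio : List String) (lookback : Int) (overlap : Int) : List (List String) :=
  cutAltGo lookback overlap audio (PySem.Int.floordiv (audio.length : Int) lookback + 1)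

-- ===== PRECONDITION & SPEC =====
-- Pre_ excludes lookback = 0, where both A and B raise ZeroDivisionError, and the meaningless corner
-- overlap > lookback with 1 ≤ lookback ≤ len(audio), where A's running start turns negative and its
-- windows wrap around the end of the list by Python's negative-slice rule — a corner no caller
-- would specify; B recurses on the suffix rest[stride:] there (negative stride = last elements)
-- and returns different windows.
def Pre_cut_audio (audio : List String) (lookback : Int) (overlap : Int) : Prop :=
  lookback ≠ 0 ∧ (1 ≤ lookback → lookback ≤ (audio.length : Int) → overlap ≤ lookback)
instance (audio : List String) (lookback : Int) (overlap : Int) : Decidable (Pre_cut_audio audio lookback overlap) := by unfold Pre_cut_audio; infer_instance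

def pvWitness_cut_audio : List String × Int × Int := (["a", "b", "c", "d", "e"], 2, 1)

def Spec_cut_audio (audio : List String) (lookback : Int) (overlap : Int) (out : List (List String)) : Prop := out = cut_audio_alt audio lookback overlap
instance (audio : List String) (lookback : Int) (overlap : Int) (out : List (List String)) : Decidable (Spec_cut_audio audio lookback overlap out) := by unfold Spec_cut_audio; infer_instance

-- ===== CLAIM (what is proved, stated in full; the proofs are below) =====
def Claim_equal_cut_audio : Prop := ∀ (audio : List String) (lookback : Int) (overlap : Int), Dom_cut_audio audio lookback overlap → Pre_cut_audio audio lookback overlap → Spec_cut_audio audio lookback overlap (cut_audio audio lookback overlap)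

-- ===== LEMMAS AND PROOFS =====

lemma cutAltGo_nonpos (lookback overlap : Int) (rest : List String) (count : Int)
    (h : count ≤ 0) : cutAltGo lookback overlap rest count = [] := by
  rw [cutAltGo]; simp [h]

lemma cutAltGo_pos (lookback overlap : Int) (rest : List String) (count : Int)
    (h : 0 < count) :
    cutAltGo lookback overlap rest count
      = (PySem.List.slice rest none (some lookback)
          ++ List.replicate (lookback - ((PySem.List.slice rest none (some lookback)).length : Int)).toNat "None")
        :: cutAltGo lookback overlap (PySem.List.slice rest (some (lookback - overlap)) none) (count - 1) := by
  rw [cutAltGo]; simp [show ¬ count ≤ 0 by omega]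

-- B's recursion over successive suffixes, in drop/take form
lemma goB_eq (audio : List String) (lookback overlap : Int)
    (hlb : 1 ≤ lookback) (hstr : 0 ≤ lookback - overlap) :
    ∀ (m : Nat) (s : Nat),
      cutAltGo lookback overlap (audio.drop s) (m : Int)
        = (List.range m).map (fun (k : Nat) =>
            (audio.drop (s + k * (lookback - overlap).toNat)).take lookback.toNat
              ++ List.replicate (lookback.toNat - ((audio.drop (s + k * (lookback - overlap).toNat)).take lookback.toNat).length) "None") := by
  intro m
  induction m with
  | zero => intro s; simp [cutAltGo_nonpos]
  | succ m ih =>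
      intro s
      rw [show ((m + 1 : Nat) : Int) = (m : Int) + 1 by push_cast; ring]
      rw [cutAltGo_pos _ _ _ _ (by positivity)]
      rw [PySem.List.slice_to _ (by omega : (0:Int) ≤ lookback)]
      rw [PySem.List.slice_from _ (by omega : (0:Int) ≤ lookback - overlap)]
      rw [List.drop_drop]
      rw [add_sub_cancel_right]
      rw [ih (s + (lookback - overlap).toNat)]
      rw [List.range_succ_eq_map, List.map_cons, List.map_map]
      congr 1
      · have hlen : ((audio.drop s).take lookback.toNat).length ≤ lookback.toNat := by
          simp [List.length_take]
        simp only [zero_mul, add_zero]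
        have hc : (lookback - (((audio.drop s).take lookback.toNat).length : Int)).toNat
            = lookback.toNat - ((audio.drop s).take lookback.toNat).length := by omega
        rw [hc]
      · apply List.map_congr_left
        intro k _
        simp only [Function.comp_def]
        have : s + (lookback - overlap).toNat + k * (lookback - overlap).toNat
            = s + (k + 1) * (lookback - overlap).toNat := by ring
        rw [this]

-- the single window A builds at a nonnegative start s, in drop/take form with the if merged away
lemma winA_eq (audio : List String) (lookback : Int) (s : Nat)
    (hlb : 1 ≤ lookback) :
    (let seq := PySem.List.slice audio (some (s : Int)) (some ((s : Int) + lookback));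
      if (seq.length : Int) < lookback then
        seq ++ (PySem.List.pyRange 0 (lookback - (seq.length : Int)) 1).map (fun _ => "None")
      else seq)
      = (audio.drop s).take lookback.toNat
          ++ List.replicate (lookback.toNat - ((audio.drop s).take lookback.toNat).length) "None" := by
  have hs : (0:Int) ≤ (s:Int) := by positivity
  have hb : (0:Int) ≤ (s:Int) + lookback := by omega
  rw [PySem.List.slice_toNat _ hs hb]
  have ht : ((s:Int) + lookback).toNat - (s:Int).toNat = lookback.toNat := by omega
  rw [ht, Int.toNat_natCast]
  dsimp only
  set seq := (audio.drop s).take lookback.toNat with hseq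
  have hlen : seq.length ≤ lookback.toNat := by
    simp [hseq, List.length_take]
  rw [PySem.List.pyRange_one]
  simp only [List.map_map]
  simp only [Function.comp_def, List.map_const', List.length_range]
  split_ifs with hlt
  · congr 1
    congr 1
    omega
  · have : seq.length = lookback.toNat := by omega
    simp [this]

-- A's fold, from an arbitrary start and accumulator
lemma foldA (audio : List String) (lookback overlap : Int) (L : List Int) (s : Int) (acc : List (List String)) :
    (L.foldl (cutAudioStep audio lookback overlap) (s, acc)).2
      = acc ++ (List.range L.length).map (fun (k : Nat) =>
          let start := s + (k : Int) * (lookback - overlap)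
          let seq := PySem.List.slice audio (some start) (some (start + lookback))
          if (seq.length : Int) < lookback then
            seq ++ (PySem.List.pyRange 0 (lookback - (seq.length : Int)) 1).map (fun _ => "None")
          else seq) := by
  induction L generalizing s acc with
  | nil => simp
  | cons x L ih =>
      rw [List.foldl_cons, ih]
      simp only [cutAudioStep, List.length_cons, List.range_succ_eq_map, List.map_cons, List.map_map]
      have hif : ∀ (c : Prop) [Decidable c] (a b : List String),
          (if c then acc ++ [a] else acc ++ [b]) = acc ++ [if c then a else b] := by
        intro c _ a b; split_ifs <;> rfl
      rw [hif, List.append_assoc]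
      congr 1
      rw [List.singleton_append]
      congr 1
      · norm_num
      · apply List.map_congr_left
        intro k _
        simp only [Function.comp_def]
        have h1 : s + lookback - overlap + (k : Int) * (lookback - overlap)
            = s + ((k : Int) + 1) * (lookback - overlap) := by ring
        have h2 : ((Nat.succ k : Nat) : Int) = (k : Int) + 1 := by push_cast; ring
        rw [h1, h2]

lemma floordiv_neg_of_pos (len lookback : Int) (h1 : 1 ≤ len) (hneg : lookback < 0) :
    PySem.Int.floordiv len lookback ≤ -1 := by
  have h2 := PySem.Int.floordiv_mul_add_mod len lookback
  have h3 := PySem.Int.mod_neg_bounds (a := len) hneg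
  by_contra hq
  have hq' : 0 ≤ PySem.Int.floordiv len lookback := by omega
  have := mul_nonpos_of_nonneg_of_nonpos hq' hneg.le
  omega

-- ===== VERDICT (by name: the statement is the Claim_ definition above) =====
theorem cut_audio_spec : Claim_equal_cut_audio := by
  intro audio lookback overlap _hdom hpre
  obtain ⟨hlb0, hov⟩ := hpre
  unfold Spec_cut_audio cut_audio cut_audio_alt
  dsimp only
  have hlen0 : (0:Int) ≤ (audio.length : Int) := by positivity
  by_cases hpos : 1 ≤ lookback
  · -- lookback ≥ 1
    by_cases hshort : (audio.length : Int) < lookback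
    · -- short input: A's early return; B peels exactly one window
      rw [if_pos hshort]
      have hfd : PySem.Int.floordiv (audio.length : Int) lookback = 0 := by
        rw [PySem.Int.floordiv_eq_iff_of_pos (by omega)]
        constructor <;> omega
      rw [hfd]
      norm_num
      rw [cutAltGo_pos _ _ _ _ (by omega : (0:Int) < 1)]
      rw [cutAltGo_nonpos _ _ _ _ (by omega : (1:Int) - 1 ≤ 0)]
      rw [PySem.List.slice_to _ (by omega : (0:Int) ≤ lookback)]
      rw [List.take_of_length_le (by omega : audio.length ≤ lookback.toNat)]
      have hc : lookback.toNat - audio.length = (lookback - ((audio.length : Nat) : Int)).toNat := by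
        omega
      rw [hc]
    · -- long input: A's loop vs B's recursion over suffixes
      rw [if_neg hshort]
      have hovlb : overlap ≤ lookback := hov hpos (by omega)
      have hstride : (0:Int) ≤ lookback - overlap := by omega
      have hfd0 : 0 ≤ PySem.Int.floordiv (audio.length : Int) lookback := by
        have := PySem.Int.floordiv_mul_add_mod (audio.length : Int) lookback
        have hm1 := PySem.Int.mod_nonneg (a := (audio.length : Int)) (by omega : (0:Int) < lookback)
        have hm2 := PySem.Int.mod_lt (a := (audio.length : Int)) (by omega : (0:Int) < lookback)
        nlinarith
      set n : Int := PySem.Int.floordiv (audio.length : Int) lookback + 1 with hn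
      have hn0 : 0 ≤ n := by omega
      rw [foldA]
      rw [PySem.List.length_pyRange_one]
      rw [List.nil_append]
      have hB : cutAltGo lookback overlap audio n
          = cutAltGo lookback overlap (audio.drop 0) ((n.toNat : Nat) : Int) := by
        rw [List.drop_zero, Int.toNat_of_nonneg hn0]
      rw [hB, goB_eq audio lookback overlap hpos hstride n.toNat 0]
      rw [show (n - 0).toNat = n.toNat by omega]
      apply List.map_congr_left
      intro k _hk
      have hw := winA_eq audio lookback (k * (lookback - overlap).toNat) hpos
      have hcast : ((k * (lookback - overlap).toNat : Nat) : Int)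
          = (k:Int) * (lookback - overlap) := by
        push_cast [Int.toNat_of_nonneg hstride]
        ring
      rw [hcast] at hw
      simpa using hw
  · -- lookback < 0 (lookback = 0 is excluded by Pre_)
    have hneg : lookback < 0 := by omega
    rw [if_neg (by omega)]
    by_cases haud : audio = []
    · subst haud
      simp only [List.length_nil, Nat.cast_zero]
      have hfd : PySem.Int.floordiv 0 lookback = 0 := by
        simp [PySem.Int.floordiv]
      rw [hfd]
      rw [cutAltGo_pos _ _ _ _ (by omega : (0:Int) < 0 + 1)]
      rw [cutAltGo_nonpos _ _ _ _ (by omega : (0:Int) + 1 - 1 ≤ 0)]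
      rw [foldA, PySem.List.length_pyRange_one, List.nil_append]
      have hsl0 : ∀ (a b : Option Int), PySem.List.slice ([]:List String) a b = [] := by
        intro a b
        cases a <;> cases b <;> simp [PySem.List.slice]
      simp [hsl0, show ¬((0:Int) < lookback) by omega,
        show (lookback - 0).toNat = 0 by omega,
        show ((0:Int) + 1 - 0).toNat = 1 by norm_num]
      all_goals omega
    · have hlen1 : (1:Int) ≤ (audio.length : Int) := by
        have : audio.length ≠ 0 := fun h => haud (List.eq_nil_of_length_eq_zero h)
        omega
      have hfd := floordiv_neg_of_pos (audio.length : Int) lookback hlen1 hneg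
      rw [foldA, PySem.List.length_pyRange_one]
      rw [show (PySem.Int.floordiv (audio.length : Int) lookback + 1 - 0).toNat = 0 by omega]
      rw [cutAltGo_nonpos _ _ _ _ (by omega)]
      simp
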